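-- pv_equiv track=rewrite | github.com/elena-faillace/ego-allo-paper | utils.py | apply_tollerance_window
-- ===== SOURCE A (Python) =====
-- def apply_tollerance_window(locations, var, rewarded_well):
--     """
--     Apply a tollerance window to the location of the rat when calculated, to avoid small oscillations in the location (10/20Hz)=0.5s.
--     If the rat is the past 10 frames is in a location 'var', then a different one and ultimately the same location 'var', then the different location is changed to 'var'.
--     Make an exeption for the reward well, don't delete it once it is reached.
--
--     INPUTS:
--     - locations: list of strings, the location of the rat in the past frames
--     - var: string, the location we want to extend to previous frames if it was present in the last 10 frames with another location in between
--     - rewarded_well: int, the number of the rewarded well, this is the exception to the rule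
--
--     OUTPUT:
--     - locations: list of strings, updated location of the rat in the past frames
--     """
--
--     tollerance_window = 10
--     first_var_present = False
--     another_var_present = False
--     if len(locations) > tollerance_window:
--         # Check if the var was present before another var was
--         for j in range(len(locations) - tollerance_window, len(locations)):
--             if locations[j] == var:
--                 first_var_present = True
--             if (
--                 (locations[j] != var)
--                 and (locations[j] != rewarded_well)
--                 and first_var_present
--             ):
--                 another_var_present = True
--         # In case update all the past 10 frames to be var
--         if first_var_present and another_var_present:
--             for j in range(len(locations) - tollerance_window, len(locations)):
--                 locations[j] = var
--     return locations
-- ===== SOURCE B (Python) =====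
-- def apply_tollerance_window(locations, var, rewarded_well):
--     if len(locations) <= 10:
--         return locations
--     reward = str(rewarded_well)
--
--     # Walk the 10-frame window back-to-front (recursively), carrying one flag:
--     # whether a frame that is neither var nor the rewarded well has been seen
--     # later in time.  Meeting var with that flag set means var must be extended.
--     def needs_fix(rest, bad_seen):
--         if not rest:
--             return False
--         x = rest[0]
--         if x == var and bad_seen:
--             return True
--         return needs_fix(rest[1:], bad_seen or (x != var and x != reward))
--
--     if needs_fix(locations[-10:][::-1], False):
--         locations[len(locations) - 10:] = [var] * 10
--     return locations
-- ===== Notes on version B (the rewrite author's own statement) =====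
-- stated objective: alternative
-- what changed: Replaced A's forward two-boolean-flag index loop plus an index-writing overwrite loop by a back-to-front recursive scan of the reversed window carrying a single 'bad frame seen later' flag, with a slice-assignment overwrite; B also compares against str(rewarded_well), fixing A's always-true str-vs-int comparison.
-- intended difference: When the 10-frame window contains var and every window entry after its first occurrence is var or str(rewarded_well) (with at least one non-var), A overwrites the window with var anyway (its 'locations[j] != rewarded_well' compares a string to an int and is always True, so the rewarded-well exception never fires) while B leaves locations unchanged, which is the documented intent ('don't delete it once it is reached'). — e.g. on apply_tollerance_window(["x", "a", "a", "a", "a", "a", "a", "a", "a", "a", "5"], "a", 5): A returns ["x", "a", "a", "a", "a", "a", "a", "a", "a", "a", "a"], B returns ["x", "a", "a", "a", "a", "a", "a", "a", "a", "a", "5"]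
import Mathlib
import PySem

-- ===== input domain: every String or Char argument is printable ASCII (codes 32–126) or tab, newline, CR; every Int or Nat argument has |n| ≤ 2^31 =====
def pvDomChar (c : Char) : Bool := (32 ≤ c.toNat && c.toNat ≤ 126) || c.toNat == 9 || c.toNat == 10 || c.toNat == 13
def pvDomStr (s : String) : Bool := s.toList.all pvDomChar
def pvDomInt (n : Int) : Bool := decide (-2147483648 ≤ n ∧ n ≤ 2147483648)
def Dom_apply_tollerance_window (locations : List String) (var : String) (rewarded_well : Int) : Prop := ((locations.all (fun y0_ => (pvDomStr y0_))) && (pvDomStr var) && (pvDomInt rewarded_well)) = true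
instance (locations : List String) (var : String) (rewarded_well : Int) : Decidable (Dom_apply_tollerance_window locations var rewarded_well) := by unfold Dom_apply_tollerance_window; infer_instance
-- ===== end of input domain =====

-- B replaces A's forward two-flag index loop (plus an index-writing overwrite loop) by a recursive
-- back-to-front scan of the reversed window carrying a single 'bad frame seen later' flag, and a
-- slice-assignment overwrite; B also compares against str(rewarded_well), fixing A's always-true
-- str-vs-int comparison. Python A mutates `locations` in place when it overwrites; Python B performs
-- the same in-place mutation; the equivalence proved here is about the return value.

-- ===== PORT A =====
-- Python 'str != int' is always True ('locations[j] != rewarded_well' with an int rewarded_well)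
def pyNeStrInt (_s : String) (_n : Int) : Bool := true

-- one iteration of A's flag loop: (first_var_present, another_var_present) updated on element v
def stepA (var : String) (rewarded_well : Int) (st : Bool × Bool) (v : String) : Bool × Bool :=
  let first := st.1 || (v == var)
  (first, st.2 || ((v != var) && pyNeStrInt v rewarded_well && first))

def apply_tollerance_window (locations : List String) (var : String) (rewarded_well : Int) : List String :=
  let tollerance_window : Int := 10
  if (locations.length : Int) > tollerance_window then
    let st := (PySem.List.pyRange ((locations.length : Int) - tollerance_window) (locations.length : Int) 1).foldl
      (fun st j => stepA var rewarded_well st (PySem.List.pyGetD locations j "")) (false, false)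
    if st.1 && st.2 then
      (PySem.List.pyRange ((locations.length : Int) - tollerance_window) (locations.length : Int) 1).foldl
        (fun acc j => PySem.List.pySetD acc j var) locations
    else locations
  else locations

-- ===== PORT B =====
-- B's inner recursion needs_fix(rest, bad_seen), transcribed structurally
def needFix (var reward : String) : List String → Bool → Bool
  | [], _ => false
  | x :: t, b =>
    if (x == var) && b then true
    else needFix var reward t (b || ((x != var) && (x != reward)))

def apply_tollerance_window_alt (locations : List String) (var : String) (rewarded_well : Int) : List String :=
  if (locations.length : Int) ≤ 10 then locations
  else
    let reward := PySem.Int.toStr rewarded_well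
    -- locations[-10:][::-1]; [::-1] (step -1) never raises, so getD only totalises
    let rev := (PySem.List.slice? (PySem.List.slice locations (some (-10 : Int)) none) none none (-1)).getD []
    if needFix var reward rev false then
      PySem.List.slice locations none (some ((locations.length : Int) - 10)) ++ List.replicate 10 var
    else locations

-- ===== PRECONDITION & SPEC =====
-- When the last-10 window contains var and every window entry after var's first occurrence is var
-- or str(rewarded_well) (with at least one non-var among them), A overwrites the window with var
-- anyway (its 'locations[j] != rewarded_well' compares a string to an int and is always True, so
-- the rewarded-well exception never fires), while B leaves locations unchanged — the documented
-- intent ("don't delete it once it is reached").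
def D_apply_tollerance_window (locations : List String) (var : String) (rewarded_well : Int) : Prop :=
  10 < locations.length ∧
  PySem.List.dedup ((locations.drop (locations.length - 10)).dropWhile (· != var))
    = [var, PySem.Int.toStr rewarded_well]
instance (locations : List String) (var : String) (rewarded_well : Int) : Decidable (D_apply_tollerance_window locations var rewarded_well) := by unfold D_apply_tollerance_window; infer_instance

def Spec_apply_tollerance_window (locations : List String) (var : String) (rewarded_well : Int) (out : List String) : Prop := ¬ D_apply_tollerance_window locations var rewarded_well → out = apply_tollerance_window_alt locations var rewarded_well
instance (locations : List String) (var : String) (rewarded_well : Int) (out : List String) : Decidable (Spec_apply_tollerance_window locations var rewarded_well out) := by unfold Spec_apply_tollerance_window; infer_instance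

def pvDiffWitness_apply_tollerance_window : List String × String × Int :=
  (["x", "a", "a", "a", "a", "a", "a", "a", "a", "a", "5"], "a", 5)
def pvDiffWitnessOut_apply_tollerance_window : (List String) × (List String) :=
  (["x", "a", "a", "a", "a", "a", "a", "a", "a", "a", "a"],
   ["x", "a", "a", "a", "a", "a", "a", "a", "a", "a", "5"])

-- ===== CLAIM (what is proved, stated in full; the proofs are below) =====
def Claim_unchanged_apply_tollerance_window : Prop := ∀ (locations : List String) (var : String) (rewarded_well : Int), Dom_apply_tollerance_window locations var rewarded_well → Spec_apply_tollerance_window locations var rewarded_well (apply_tollerance_window locations var rewarded_well)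
def Claim_changed_apply_tollerance_window : Prop := Dom_apply_tollerance_window (pvDiffWitness_apply_tollerance_window.1) (pvDiffWitness_apply_tollerance_window.2.1) (pvDiffWitness_apply_tollerance_window.2.2) ∧ D_apply_tollerance_window (pvDiffWitness_apply_tollerance_window.1) (pvDiffWitness_apply_tollerance_window.2.1) (pvDiffWitness_apply_tollerance_window.2.2) ∧ apply_tollerance_window (pvDiffWitness_apply_tollerance_window.1) (pvDiffWitness_apply_tollerance_window.2.1) (pvDiffWitness_apply_tollerance_window.2.2) = pvDiffWitnessOut_apply_tollerance_window.1 ∧ apply_tollerance_window_alt (pvDiffWitness_apply_tollerance_window.1) (pvDiffWitness_apply_tollerance_window.2.1) (pvDiffWitness_apply_tollerance_window.2.2) = pvDiffWitnessOut_apply_tollerance_window.2 ∧ pvDiffWitnessOut_apply_tollerance_window.1 ≠ pvDiffWitnessOut_apply_tollerance_window.2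
def Claim_exact_apply_tollerance_window : Prop := ∀ (locations : List String) (var : String) (rewarded_well : Int), Dom_apply_tollerance_window locations var rewarded_well → D_apply_tollerance_window locations var rewarded_well → apply_tollerance_window locations var rewarded_well ≠ apply_tollerance_window_alt locations var rewarded_well

-- ===== LEMMAS AND PROOFS =====

-- A's overwrite loop: setting every index of range(a, n) to v replaces the suffix by replicate
lemma take_succ_set (acc : List String) (a : Nat) (v : String) (h : a < acc.length) :
    (acc.set a v).take (a+1) = acc.take a ++ [v] := by
  rw [List.set_eq_take_append_cons_drop, if_pos h, List.take_append]
  simp [Nat.min_eq_left (Nat.le_of_lt h), show a+1-a = 1 by omega]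

lemma foldl_pySetD_range (v : String) : ∀ (k a : Nat) (n : Nat) (acc : List String),
    a + k = n → acc.length = n →
    (PySem.List.pyRange (a : Int) (n : Int) 1).foldl (fun acc j => PySem.List.pySetD acc j v) acc
      = acc.take a ++ List.replicate k v
  | 0, a, n, acc, hk, hl => by
    have : (PySem.List.pyRange (a : Int) (n : Int) 1) = [] := by
      rw [PySem.List.pyRange_one]
      simp [show ((n : Int) - a).toNat = 0 by omega]
    rw [this]
    simp only [List.foldl_nil, List.replicate_zero, List.append_nil]
    exact (List.take_of_length_le (by omega)).symm
  | k+1, a, n, acc, hk, hl => by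
    rw [PySem.List.pyRange_one_cons (by omega)]
    simp only [List.foldl_cons, PySem.List.pySetD_natCast]
    have : ((a : Int) + 1) = ((a + 1 : Nat) : Int) := by push_cast; ring
    rw [this, foldl_pySetD_range v k (a+1) n (acc.set a v) (by omega) (by simp [hl])]
    rw [take_succ_set acc a v (by omega)]
    simp [List.replicate_succ]

-- A's flag loop, second flag: has an element ≠ var after first becomes true
def flagB (var : String) : Bool → List String → Bool
  | _, [] => false
  | f, x :: t => if x == var then flagB var true t else f || flagB var f t

lemma stepA_foldl (var : String) (rw : Int) : ∀ (l : List String) (f a : Bool),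
    l.foldl (stepA var rw) (f, a) = (f || l.any (· == var), a || flagB var f l)
  | [], f, a => by simp [flagB]
  | x :: t, f, a => by
    by_cases hx : x == var
    · simp only [List.foldl_cons, stepA, pyNeStrInt, hx, flagB]
      rw [stepA_foldl var rw t]
      cases f <;> simp [bne, hx]
    · simp only [List.foldl_cons, stepA, pyNeStrInt, flagB, if_neg hx]
      rw [stepA_foldl var rw t]
      have hx' : (x != var) = true := by simp_all [bne]
      cases f <;> cases a <;> simp [hx, hx']

lemma flagB_true (var : String) : ∀ (l : List String),
    flagB var true l = l.any (fun x => x != var)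
  | [] => by simp [flagB]
  | x :: t => by
    by_cases hx : x == var
    · simp [flagB, flagB_true var t, bne, hx]
    · simp [flagB, bne, hx]

lemma flagB_false_append (var : String) : ∀ (pre suf : List String), var ∉ pre →
    flagB var false (pre ++ var :: suf) = suf.any (fun x => x != var)
  | [], suf, _ => by simp [flagB, flagB_true var suf]
  | x :: t, suf, h => by
    have hxv : x ≠ var := fun e => h (by simp [e])
    have hx : ¬ (x == var) = true := by simpa using hxv
    have ht : var ∉ t := fun m => h (List.mem_cons_of_mem _ m)
    simp only [List.cons_append, flagB, if_neg hx, Bool.false_or]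
    exact flagB_false_append var t suf ht

lemma dropWhile_ne_append (var : String) : ∀ (pre suf : List String), var ∉ pre →
    (pre ++ var :: suf).dropWhile (· != var) = var :: suf
  | [], suf, _ => by simp
  | x :: t, suf, h => by
    have hxv : x ≠ var := fun e => h (by simp [e])
    have hb : (x != var) = true := by simpa using hxv
    simp only [List.cons_append, List.dropWhile, hb]
    exact dropWhile_ne_append var t suf (fun m => h (List.mem_cons_of_mem _ m))

lemma dropWhile_ne_not_mem (var : String) : ∀ (l : List String), var ∉ l →
    l.dropWhile (· != var) = []
  | [], _ => rfl
  | x :: t, h => by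
    have hxv : x ≠ var := fun e => h (by simp [e])
    have hb : (x != var) = true := by simpa using hxv
    simp only [List.dropWhile, hb]
    exact dropWhile_ne_not_mem var t (fun m => h (List.mem_cons_of_mem _ m))

lemma foldl_add_pair_absorb (var s : String) : ∀ (t : List String),
    (∀ x ∈ t, x = var ∨ x = s) → t.foldl PySem.Set.add [var, s] = [var, s]
  | [], _ => rfl
  | x :: t, h => by
    have hx : PySem.Set.add [var, s] x = [var, s] := by
      rcases h x (List.mem_cons_self ..) with e | e <;> simp [PySem.Set.add, e]
    rw [List.foldl_cons, hx]
    exact foldl_add_pair_absorb var s t (fun y hy => h y (List.mem_cons_of_mem _ hy))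

lemma foldl_add_singleton (var s : String) : ∀ (t : List String), s ∈ t → s ≠ var →
    (∀ x ∈ t, x = var ∨ x = s) → t.foldl PySem.Set.add [var] = [var, s]
  | x :: t, hs, hne, h => by
    rcases h x (List.mem_cons_self ..) with e | e
    · have hx : PySem.Set.add [var] x = [var] := by simp [PySem.Set.add, e]
      rw [List.foldl_cons, hx]
      have hst : s ∈ t := by
        rcases List.mem_cons.mp hs with e' | e'
        · exact absurd (e'.trans e) hne
        · exact e'
      exact foldl_add_singleton var s t hst hne (fun y hy => h y (List.mem_cons_of_mem _ hy))
    · have hx : PySem.Set.add [var] x = [var, s] := by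
        simp [PySem.Set.add, e, hne]
      rw [List.foldl_cons, hx]
      exact foldl_add_pair_absorb var s t (fun y hy => h y (List.mem_cons_of_mem _ hy))

lemma dedup_pair_iff (var s : String) (suf : List String) :
    PySem.List.dedup (var :: suf) = [var, s] ↔
      (suf.any (· != var)) = true ∧ (suf.all (fun x => x == var || x == s)) = true := by
  constructor
  · intro h
    have hne : s ≠ var := by
      have := PySem.List.nodup_dedup (var :: suf)
      rw [h] at this
      simpa [eq_comm] using this
    have hmem : s ∈ suf := by
      have : s ∈ PySem.List.dedup (var :: suf) := by rw [h]; simp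
      rcases List.mem_cons.mp ((PySem.List.mem_dedup _ s).mp this) with e | e
      · exact absurd e hne
      · exact e
    refine ⟨List.any_eq_true.mpr ⟨s, hmem, by simpa using hne⟩, List.all_eq_true.mpr ?_⟩
    intro x hx
    have : x ∈ PySem.List.dedup (var :: suf) :=
      (PySem.List.mem_dedup _ x).mpr (List.mem_cons_of_mem _ hx)
    rw [h] at this
    simpa using this
  · rintro ⟨h1, h2⟩
    obtain ⟨y, hy, hyne⟩ := List.any_eq_true.mp h1
    have hyne' : y ≠ var := by simpa using hyne
    have hy2 := List.all_eq_true.mp h2 y hy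
    have hys : y = s := by
      rcases (by simpa using hy2 : y = var ∨ y = s) with e | e
      · exact absurd e hyne'
      · exact e
    have hall : ∀ x ∈ suf, x = var ∨ x = s := fun x hx => by
      simpa using List.all_eq_true.mp h2 x hx
    rw [PySem.List.dedup_eq_ofList]
    show (var :: suf).foldl PySem.Set.add [] = [var, s]
    rw [List.foldl_cons]
    have : PySem.Set.add [] var = [var] := rfl
    rw [this]
    exact foldl_add_singleton var s suf (hys ▸ hy) (hys ▸ hyne') hall

-- ===== B-side lemmas: characterising needFix on the reversed window =====

-- 'bad element before a var occurrence' in the scanned (reversed) list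
def pairEx (var reward : String) : List String → Bool
  | [] => false
  | x :: t => ((x != var) && (x != reward) && t.contains var) || pairEx var reward t

lemma needFix_eq (var reward : String) : ∀ (l : List String) (b : Bool),
    needFix var reward l b = ((b && l.contains var) || pairEx var reward l)
  | [], b => by simp [needFix, pairEx]
  | x :: t, b => by
    have IH := needFix_eq var reward t
    by_cases hx : (x == var) = true
    · have hvx : x = var := by simpa using hx
      subst hvx
      cases b <;> simp [needFix, pairEx, IH]
    · have hbv : (x != var) = true := by simpa [bne] using hx
      have hvx : ¬ var = x := fun e => hx (by simp [e])
      cases b <;> by_cases hm : var ∈ t <;>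
        simp [needFix, pairEx, hx, hbv, hvx, IH, hm]

lemma pairEx_not_mem (var reward : String) : ∀ (l : List String), var ∉ l →
    pairEx var reward l = false
  | [], _ => rfl
  | x :: t, h => by
    have ht : var ∉ t := fun m => h (List.mem_cons_of_mem _ m)
    simp [pairEx, pairEx_not_mem var reward t ht]
    exact fun _ _ => ht

lemma pairEx_append_mem (var reward : String) (r : List String) (hr : var ∈ r) :
    ∀ (l : List String),
    pairEx var reward (l ++ r)
      = (l.any (fun x => (x != var) && (x != reward)) || pairEx var reward r)
  | [] => by simp
  | x :: t => by
    have hc : (t ++ r).contains var = true := by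
      simp [List.mem_append, hr]
    simp only [List.cons_append, pairEx, hc, Bool.and_true, List.any_cons,
      pairEx_append_mem var reward r hr t]
    cases ((x != var) && (x != reward)) <;> simp

-- needFix over the reversed window, at the first-occurrence decomposition
lemma needFix_reverse_decomp (var reward : String) (pre suf : List String) (hp : var ∉ pre) :
    needFix var reward (pre ++ var :: suf).reverse false
      = suf.any (fun x => (x != var) && (x != reward)) := by
  have hrev : (pre ++ var :: suf).reverse = suf.reverse ++ (var :: pre.reverse) := by
    simp
  rw [hrev, needFix_eq,
    pairEx_append_mem var reward (var :: pre.reverse) (List.mem_cons_self ..) suf.reverse]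
  have hpre : pairEx var reward pre.reverse = false :=
    pairEx_not_mem var reward pre.reverse (by simpa using hp)
  simp [pairEx, hpre, List.any_reverse]

lemma needFix_reverse_not_mem (var reward : String) (w : List String) (h : var ∉ w) :
    needFix var reward w.reverse false = false := by
  rw [needFix_eq, pairEx_not_mem var reward w.reverse (by simpa using h)]
  simp

-- unfold B's branch to the recursion on the reversed window (10 < length case)
lemma alt_unfold (locations : List String) (var : String) (rw : Int)
    (h : 10 < locations.length) :
    apply_tollerance_window_alt locations var rw
      = (if needFix var (PySem.Int.toStr rw) (locations.drop (locations.length - 10)).reverse false then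
          PySem.List.slice locations none (some ((locations.length : Int) - 10)) ++ List.replicate 10 var
        else locations) := by
  simp only [apply_tollerance_window_alt]
  rw [if_neg (by omega),
      PySem.List.slice_from_neg_ofNat locations 10 (by omega),
      PySem.List.slice?_none_none_neg_one]
  rfl

-- ===== VERDICT (by name: the statement is the Claim_ definition above) =====
theorem apply_tollerance_window_spec : Claim_unchanged_apply_tollerance_window := by
  intro locations var rw _dom hnD
  by_cases h10 : (locations.length : Int) ≤ 10
  · simp only [apply_tollerance_window, apply_tollerance_window_alt]
    rw [if_neg (by omega), if_pos h10]
  · have hlen : 10 < locations.length := by omega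
    rw [alt_unfold locations var rw hlen]
    simp only [apply_tollerance_window]
    rw [if_pos (by omega),
        PySem.List.foldl_pyRange_pyGetD' locations "" (stepA var rw) (false, false) (by omega),
        stepA_foldl var rw]
    have htn : ((locations.length : Int) - 10).toNat = locations.length - 10 := by omega
    rw [htn]
    set w := locations.drop (locations.length - 10) with hwdef
    by_cases hmem : var ∈ w
    · have hsome : (PySem.List.index? w var).isSome = true :=
        (PySem.List.index?_isSome_iff w var).mpr hmem
      obtain ⟨i, hi⟩ := Option.isSome_iff_exists.mp hsome
      obtain ⟨pre, suf, hdec, hpl, hnpre⟩ := (PySem.List.index?_eq_some_iff w var i).mp hi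
      have hfst : (false || w.any (· == var)) = true := by
        simp only [Bool.false_or, List.any_eq_true]
        exact ⟨var, hmem, by simp⟩
      have hsnd : (false || flagB var false w) = suf.any (fun x => x != var) := by
        rw [Bool.false_or, hdec]
        exact flagB_false_append var pre suf hnpre
      have hnf : needFix var (PySem.Int.toStr rw) w.reverse false
          = suf.any (fun x => (x != var) && (x != PySem.Int.toStr rw)) := by
        rw [hdec]; exact needFix_reverse_decomp var (PySem.Int.toStr rw) pre suf hnpre
      have hD : ¬ ((suf.any (fun x => x != var)) = true ∧
            (suf.all (fun x => x == var || x == PySem.Int.toStr rw)) = true) := by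
        rintro ⟨h1, h2⟩
        refine hnD ⟨hlen, ?_⟩
        rw [← hwdef, hdec, dropWhile_ne_append var pre suf hnpre, dedup_pair_iff]
        exact ⟨h1, h2⟩
      simp only [hfst, hsnd, hnf, Bool.true_and]
      by_cases hany : suf.any (fun x => x != var) = true
      · have hall : ¬ suf.all (fun x => x == var || x == PySem.Int.toStr rw) = true := by
          intro h; exact hD ⟨hany, h⟩
        have hbany : (suf.any fun x => x != var && x != PySem.Int.toStr rw) = true := by
          rw [List.all_eq_true] at hall
          push Not at hall
          obtain ⟨x, hx, hxne⟩ := hall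
          refine List.any_eq_true.mpr ⟨x, hx, ?_⟩
          simpa [bne] using hxne
        rw [if_pos hany, if_pos hbany,
            show ((locations.length : Int) - 10) = (((locations.length - 10 : Nat) : Int)) by omega,
            foldl_pySetD_range var 10 (locations.length - 10) locations.length locations (by omega) rfl,
            PySem.List.slice_to locations (by omega)]
        simp
      · rw [if_neg hany, if_neg (by
          intro hb
          apply hany
          rw [List.any_eq_true] at hb ⊢
          obtain ⟨x, hx, hxb⟩ := hb
          exact ⟨x, hx, (by simpa using hxb : (x != var) = true ∧ _).1⟩)]
    · have hfst : (false || w.any (· == var)) = false := by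
        simp only [Bool.false_or, List.any_eq_false]
        intro x hx
        simp only [beq_iff_eq]
        intro e; exact hmem (e ▸ hx)
      rw [hfst, needFix_reverse_not_mem var (PySem.Int.toStr rw) w hmem]
      simp
theorem apply_tollerance_window_changed : Claim_changed_apply_tollerance_window := by
  unfold Claim_changed_apply_tollerance_window; decide
theorem apply_tollerance_window_tight : Claim_exact_apply_tollerance_window := by
  intro locations var rw _dom hD
  obtain ⟨hlen, h2⟩ := hD
  have htn : ((locations.length : Int) - 10).toNat = locations.length - 10 := by omega
  set w := locations.drop (locations.length - 10) with hwdef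
  have hmem : var ∈ w := by
    by_contra hm
    rw [dropWhile_ne_not_mem var w hm] at h2
    exact absurd h2 (by simp [PySem.List.dedup_eq_ofList, PySem.Set.ofList])
  have hsome : (PySem.List.index? w var).isSome = true :=
    (PySem.List.index?_isSome_iff w var).mpr hmem
  obtain ⟨i, hi⟩ := Option.isSome_iff_exists.mp hsome
  obtain ⟨pre, suf, hdec, hpl, hnpre⟩ := (PySem.List.index?_eq_some_iff w var i).mp hi
  rw [hdec, dropWhile_ne_append var pre suf hnpre, dedup_pair_iff] at h2
  obtain ⟨hany, hall⟩ := h2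
  have hA : apply_tollerance_window locations var rw
      = locations.take (locations.length - 10) ++ List.replicate 10 var := by
    simp only [apply_tollerance_window]
    rw [if_pos (by omega),
        PySem.List.foldl_pyRange_pyGetD' locations "" (stepA var rw) (false, false) (by omega),
        htn, ← hwdef, stepA_foldl var rw]
    have hfst : (false || w.any (· == var)) = true := by
      simp only [Bool.false_or, List.any_eq_true]
      exact ⟨var, hmem, by simp⟩
    have hsnd : (false || flagB var false w) = true := by
      rw [Bool.false_or, hdec, flagB_false_append var pre suf hnpre]
      exact hany
    simp only [hfst, hsnd, Bool.and_self, if_true]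
    rw [show ((locations.length : Int) - 10) = (((locations.length - 10 : Nat) : Int)) by omega,
        foldl_pySetD_range var 10 (locations.length - 10) locations.length locations (by omega) rfl]
  have hB : apply_tollerance_window_alt locations var rw = locations := by
    rw [alt_unfold locations var rw hlen, ← hwdef]
    have hnf : needFix var (PySem.Int.toStr rw) w.reverse false = false := by
      rw [hdec, needFix_reverse_decomp var (PySem.Int.toStr rw) pre suf hnpre]
      rw [List.any_eq_false]
      intro x hx
      have hx2 := List.all_eq_true.mp hall x hx
      simp only [Bool.or_eq_true, beq_iff_eq] at hx2
      rcases hx2 with h | h <;> simp [h]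
    rw [hnf]; simp
  rw [hA, hB]
  intro heq
  have hlt : (locations.take (locations.length - 10)).length = locations.length - 10 := by
    rw [List.length_take]; omega
  have hwr : List.replicate 10 var = w :=
    calc List.replicate 10 var
        = List.drop (locations.take (locations.length - 10)).length
            (locations.take (locations.length - 10) ++ List.replicate 10 var) :=
          List.drop_left.symm
      _ = List.drop (locations.length - 10)
            (locations.take (locations.length - 10) ++ List.replicate 10 var) := by rw [hlt]
      _ = List.drop (locations.length - 10) locations := by rw [heq]
      _ = w := hwdef.symm
  obtain ⟨x, hx, hxne⟩ := List.any_eq_true.mp hany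
  have hxw : x ∈ w := by
    rw [hdec]; exact List.mem_append_right _ (List.mem_cons_of_mem _ hx)
  rw [← hwr] at hxw
  have := List.eq_of_mem_replicate hxw
  simp [this] at hxne
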